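-- pv_equiv track=rewrite | github.com/ellabettison/AutoPromptTuner | prompt_testing/prompt_tester_object_comparison.py | get_outer_curly_bracket_value
-- ===== SOURCE A (Python) =====
-- def get_outer_curly_bracket_value(s):
--     # Initialize a variable to store the result
--     result = ''
--     # Flag to indicate if we're inside the outer curly brackets
--     inside_outer = False
--     # Counter to track the nesting level of curly brackets
--     brace_count = 0
--
--     if s is None:
--         return result
--
--     for char in s:
--         if char == '{':
--             if brace_count == 0:
--                 inside_outer = True
--             brace_count += 1
--         elif char == '}':
--             brace_count -= 1
--             if brace_count == 0:
--                 inside_outer = False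
--                 break
--
--         if inside_outer:
--             result += char
--
--     return result+"}"
-- ===== SOURCE B (Python) =====
-- def get_outer_curly_bracket_value(s):
--     if s is None:
--         return ''
--     depth = 0
--     start = -1
--     for i, c in enumerate(s):
--         if c == '{':
--             if depth == 0:
--                 start = i
--             depth += 1
--         elif c == '}':
--             depth -= 1
--             if depth == 0:
--                 return s[start:i + 1]
--     if start >= 0:
--         return s[start:] + '}'
--     return '}'
-- ===== Notes on version B (the rewrite author's own statement) =====
-- stated objective: simpler
-- what changed: B replaces A's char-by-char accumulation with an inside_outer flag by an index scan that tracks only the nesting depth, remembers the start index of the outer opening brace, and returns a slice of s (with A's same fallbacks on unbalanced or brace-free input).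
import Mathlib
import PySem

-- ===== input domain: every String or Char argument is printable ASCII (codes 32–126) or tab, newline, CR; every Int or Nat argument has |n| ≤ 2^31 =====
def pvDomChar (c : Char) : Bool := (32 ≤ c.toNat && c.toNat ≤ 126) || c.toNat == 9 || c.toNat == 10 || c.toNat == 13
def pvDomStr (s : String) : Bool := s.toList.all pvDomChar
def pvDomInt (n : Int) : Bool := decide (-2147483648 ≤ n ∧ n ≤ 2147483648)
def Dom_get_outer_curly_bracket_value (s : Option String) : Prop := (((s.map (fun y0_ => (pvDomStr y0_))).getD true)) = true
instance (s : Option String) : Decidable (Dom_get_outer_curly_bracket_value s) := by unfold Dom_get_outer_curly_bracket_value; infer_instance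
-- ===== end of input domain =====

-- B replaces A's accumulate-while-inside_outer scan by a depth-tracking index scan that
-- remembers the start index of the outer '{' and returns a slice (objective: simpler).

-- ===== PORT A =====
-- A's for-loop over the characters; state (result, inside_outer, brace_count);
-- `break` followed by `return result+"}"` is the early exit in the '}' branch.
def pvGoA : List Char → List Char → Bool → Int → List Char
  | [], result, _, _ => result ++ ['}']
  | c :: rest, result, inside, count =>
    if c = '{' then
      let inside' := if count = 0 then true else inside
      let count' := count + 1
      let result' := if inside' then result ++ [c] else result
      pvGoA rest result' inside' count'
    else if c = '}' then
      let count' := count - 1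
      if count' = 0 then result ++ ['}']   -- inside_outer := false; break; return result+"}"
      else
        let result' := if inside then result ++ [c] else result
        pvGoA rest result' inside count'
    else
      let result' := if inside then result ++ [c] else result
      pvGoA rest result' inside count

def get_outer_curly_bracket_value (s : Option String) : String :=
  match s with
  | none => ""
  | some str => String.mk (pvGoA str.toList [] false 0)

-- ===== PORT B =====
-- Source B's enumerate loop; state (i, depth, start); early `return s[start:i+1]`.
def pvGoB : List Char → Int → Int → Int → List Char → List Char
  | [], _, _, start, s =>
    if 0 ≤ start then PySem.List.slice s (some start) none ++ ['}'] else ['}']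
  | c :: rest, i, depth, start, s =>
    if c = '{' then
      let start' := if depth = 0 then i else start
      pvGoB rest (i + 1) (depth + 1) start' s
    else if c = '}' then
      let depth' := depth - 1
      if depth' = 0 then PySem.List.slice s (some start) (some (i + 1))
      else pvGoB rest (i + 1) depth' start s
    else pvGoB rest (i + 1) depth start s

def get_outer_curly_bracket_value_alt (s : Option String) : String :=
  match s with
  | none => ""
  | some str => String.mk (pvGoB str.toList 0 0 (-1) str.toList)

-- ===== PRECONDITION & SPEC =====
def Spec_get_outer_curly_bracket_value (s : Option String) (out : String) : Prop := out = get_outer_curly_bracket_value_alt s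
instance (s : Option String) (out : String) : Decidable (Spec_get_outer_curly_bracket_value s out) := by unfold Spec_get_outer_curly_bracket_value; infer_instance

-- ===== CLAIM (what is proved, stated in full; the proofs are below) =====
def Claim_equal_get_outer_curly_bracket_value : Prop := ∀ (s : Option String), Dom_get_outer_curly_bracket_value s → Spec_get_outer_curly_bracket_value s (get_outer_curly_bracket_value s)

-- ===== LEMMAS AND PROOFS =====

-- Loop invariant: at position n (cs = s.drop n), A's brace_count equals B's depth;
-- if inside_outer then start is some a ≤ n with result = s[a:n], else start = -1,
-- result empty and the count is ≤ 0.
lemma pvGo_eq (s : List Char) : ∀ (cs : List Char) (n : Nat) (result : List Char)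
    (inside : Bool) (count start : Int),
    cs = s.drop n →
    (if inside then
        ∃ a : Nat, start = (a : Int) ∧ a ≤ n ∧ result = (s.drop a).take (n - a) ∧ 1 ≤ count
      else start = -1 ∧ result = [] ∧ count ≤ 0) →
    pvGoA cs result inside count = pvGoB cs (n : Int) count start s := by
  intro cs
  induction cs with
  | nil =>
    intro n result inside count start hdrop hinv
    cases inside with
    | false =>
      obtain ⟨hs, hr, _⟩ := hinv
      simp [pvGoA, pvGoB, hs, hr]
    | true =>
      obtain ⟨a, hs, han, hr, _⟩ := hinv
      have hlen : s.length ≤ n := by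
        have := congrArg List.length hdrop
        simp at this; omega
      have htake : (s.drop a).take (n - a) = s.drop a := by
        apply List.take_of_length_le; simp; omega
      simp [pvGoA, pvGoB, hs, hr, htake, PySem.List.slice_from_natCast]
  | cons c rest ih =>
    intro n result inside count start hdrop hinv
    have hget : s[n]? = some c := by
      have h0 : (s.drop n)[0]? = some c := by rw [← hdrop]; rfl
      simpa using h0
    have hrest : rest = s.drop (n + 1) := by
      have := congrArg List.tail hdrop
      simpa [List.tail_drop] using this
    -- extending a slice s[a:n] by the character at n gives s[a:n+1]
    have hext : ∀ a : Nat, a ≤ n →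
        (s.drop a).take (n - a) ++ [c] = (s.drop a).take (n + 1 - a) := by
      intro a ha
      have h1 : n + 1 - a = (n - a) + 1 := by omega
      have h2 : (s.drop a)[n - a]? = some c := by
        rw [List.getElem?_drop]
        have : a + (n - a) = n := by omega
        rw [this, hget]
      rw [h1, List.take_add_one, h2]; rfl
    by_cases hc : c = '{'
    · subst hc
      cases inside with
      | false =>
        obtain ⟨hs, hr, hcnt⟩ := hinv
        by_cases h0 : count = 0
        · subst h0
          have hinv' : _ := ih (n + 1) ([] ++ ['{']) true ((0 : Int) + 1) ((n : Int)) hrest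
            ⟨n, rfl, by omega, by simpa using hext n (le_refl n), by omega⟩
          simp only [pvGoA, pvGoB, hs, hr]
          simpa [Int.natCast_add] using hinv'
        · have hinv' : _ := ih (n + 1) [] false (count + 1) (-1) hrest ⟨rfl, rfl, by omega⟩
          simp only [pvGoA, pvGoB, hs, hr]
          simpa [Int.natCast_add, h0] using hinv'
      | true =>
        obtain ⟨a, hs, han, hr, hcnt⟩ := hinv
        have h0 : ¬ count = 0 := by omega
        have hinv' : _ := ih (n + 1) (result ++ ['{']) true (count + 1) start hrest
          ⟨a, hs, by omega, by rw [hr]; exact hext a han, by omega⟩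
        simp only [pvGoA, pvGoB]
        simpa [Int.natCast_add, h0] using hinv'
    · by_cases hc2 : c = '}'
      · subst hc2
        cases inside with
        | false =>
          obtain ⟨hs, hr, hcnt⟩ := hinv
          have h0 : ¬ (count - 1 = 0) := by omega
          have hinv' : _ := ih (n + 1) [] false (count - 1) (-1) hrest ⟨rfl, rfl, by omega⟩
          simp only [pvGoA, pvGoB, hs, hr]
          simpa [Int.natCast_add, h0] using hinv'
        | true =>
          obtain ⟨a, hs, han, hr, hcnt⟩ := hinv
          by_cases h0 : count - 1 = 0
          · -- closing brace of the outer bracket: A breaks, B slices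
            have hA : pvGoA ('}' :: rest) result true count = result ++ ['}'] := by
              simp [pvGoA, h0]
            have hB : pvGoB ('}' :: rest) (n : Int) count start s
                = PySem.List.slice s (some start) (some ((n : Int) + 1)) := by
              simp [pvGoB, h0]
            rw [hA, hB, hs]
            have hcast : (n : Int) + 1 = ((n + 1 : Nat) : Int) := by push_cast; ring
            rw [hcast, PySem.List.slice_natCast, hr]
            exact hext a han
          · have hinv' : _ := ih (n + 1) (result ++ ['}']) true (count - 1) start hrest
              ⟨a, hs, by omega, by rw [hr]; exact hext a han, by omega⟩
            simp only [pvGoA, pvGoB]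
            simpa [Int.natCast_add, h0] using hinv'
      · cases inside with
        | false =>
          obtain ⟨hs, hr, hcnt⟩ := hinv
          have hinv' : _ := ih (n + 1) [] false count (-1) hrest ⟨rfl, rfl, hcnt⟩
          simp only [pvGoA, pvGoB, hs, hr]
          simpa [Int.natCast_add, hc, hc2] using hinv'
        | true =>
          obtain ⟨a, hs, han, hr, hcnt⟩ := hinv
          have hinv' : _ := ih (n + 1) (result ++ [c]) true count start hrest
            ⟨a, hs, by omega, by rw [hr]; exact hext a han, hcnt⟩
          simp only [pvGoA, pvGoB]
          simpa [Int.natCast_add, hc, hc2] using hinv'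

-- ===== VERDICT (by name: the statement is the Claim_ definition above) =====
theorem get_outer_curly_bracket_value_spec : Claim_equal_get_outer_curly_bracket_value := by
  intro s _
  unfold Spec_get_outer_curly_bracket_value get_outer_curly_bracket_value get_outer_curly_bracket_value_alt
  cases s with
  | none => rfl
  | some str =>
    have h := pvGo_eq str.toList str.toList 0 [] false 0 (-1) (by simp) ⟨rfl, rfl, le_refl 0⟩
    have h2 : pvGoA str.toList [] false 0 = pvGoB str.toList 0 0 (-1) str.toList := by
      simpa using h
    exact congrArg String.mk h2
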